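-- pv_equiv track=rewrite | github.com/pukoin/integala | ym/ymdoc/amazon.py | maxShippingDist
-- ===== SOURCE A (Python) =====
-- def maxShippingDist(list1, list2, maxDist):
--     if not list1 or not list1[0] or not list2 or not list2[0]: return []
--     ret = []
--     objectDist = 0
--     for item1 in list1:
--         for item2 in list2:
--             if len(item1) == 2 and len(item2) == 2:
--                 if item1[1] + item2[1] <= maxDist:
--                     objectDist = max(objectDist, item1[1] + item2[1])
--     for item1 in list1:
--         for item2 in list2:
--             if len(item1) == 2 and len(item2) == 2:
--                 if item1[1] + item2[1] == objectDist: ret.append([item1[0], item2[0]])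
--     return ret
-- ===== SOURCE B (Python) =====
-- # B: precompute sorted distance list + value->ids index for list2; per item1 a binary
-- # search finds its best partner, and the answer pairs are emitted via the index instead
-- # of a second nested scan over list2.
--
-- def _bisect_right(a, x):
--     lo, hi = 0, len(a)
--     while lo < hi:
--         mid = (lo + hi) // 2
--         if x < a[mid]:
--             hi = mid
--         else:
--             lo = mid + 1
--     return lo
--
-- def maxShippingDist(list1, list2, maxDist):
--     if not list1 or not list1[0] or not list2 or not list2[0]:
--         return []
--     vals2 = sorted(item[1] for item in list2 if len(item) == 2)
--     ids_by_val = {}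
--     for item in list2:
--         if len(item) == 2:
--             ids_by_val.setdefault(item[1], []).append(item[0])
--     best = 0
--     for item in list1:
--         if len(item) == 2:
--             i = _bisect_right(vals2, maxDist - item[1])
--             if i > 0:
--                 s = item[1] + vals2[i - 1]
--                 if s > best:
--                     best = s
--     out = []
--     for item in list1:
--         if len(item) == 2:
--             for j in ids_by_val.get(best - item[1], []):
--                 out.append([item[0], j])
--     return out
-- ===== Notes on version B (the rewrite author's own statement) =====
-- stated objective: faster
-- what changed: Replaces both O(n*m) nested scans: B sorts list2's distances and binary-searches the best partner per list1 item, and emits the answer pairs through a value->ids index of list2 built once instead of rescanning list2 per list1 item.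
import Mathlib
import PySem

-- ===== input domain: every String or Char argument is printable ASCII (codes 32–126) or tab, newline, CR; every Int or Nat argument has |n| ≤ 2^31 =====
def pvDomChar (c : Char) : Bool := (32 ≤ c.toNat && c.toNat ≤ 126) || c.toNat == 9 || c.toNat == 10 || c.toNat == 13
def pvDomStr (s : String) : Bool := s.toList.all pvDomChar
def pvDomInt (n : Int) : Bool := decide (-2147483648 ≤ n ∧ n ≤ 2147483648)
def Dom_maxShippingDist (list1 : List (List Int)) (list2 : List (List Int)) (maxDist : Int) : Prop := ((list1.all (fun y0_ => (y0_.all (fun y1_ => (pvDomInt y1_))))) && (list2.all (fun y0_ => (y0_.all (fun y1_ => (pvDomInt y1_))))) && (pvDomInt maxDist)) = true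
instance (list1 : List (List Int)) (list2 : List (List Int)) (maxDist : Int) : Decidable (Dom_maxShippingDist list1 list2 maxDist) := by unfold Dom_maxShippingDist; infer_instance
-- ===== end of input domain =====

-- B replaces A's two O(n*m) nested scans by a sort + per-item binary search for the best
-- pair sum and a value->ids index of list2 for emitting the answer pairs (objective: faster).

-- ===== PORT A =====
-- item1[1]/item2[1]/item[0] are read only under the 'len == 2' guards, so getD is exact there
def maxShippingDist (list1 : List (List Int)) (list2 : List (List Int)) (maxDist : Int) : List (List Int) :=
  if list1 = [] ∨ list1.headD [] = [] ∨ list2 = [] ∨ list2.headD [] = [] then []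
  else
    let objectDist : Int := list1.foldl (fun od item1 =>
      list2.foldl (fun od item2 =>
        if item1.length = 2 ∧ item2.length = 2 then
          if item1.getD 1 0 + item2.getD 1 0 ≤ maxDist then
            max od (item1.getD 1 0 + item2.getD 1 0)
          else od
        else od) od) 0
    list1.foldl (fun ret item1 =>
      list2.foldl (fun ret item2 =>
        if item1.length = 2 ∧ item2.length = 2 then
          if item1.getD 1 0 + item2.getD 1 0 = objectDist then
            ret ++ [[item1.getD 0 0, item2.getD 0 0]]
          else ret
        else ret) ret) []

-- ===== PORT B =====
-- Source B's hand-written _bisect_right is exactly the loop PySem.List.bisectRight implements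
-- (lo/hi, mid = (lo+hi)//2, 'if x < a[mid]: hi = mid else: lo = mid+1'); indexing under the
-- 'len == 2' guards is again exact via getD.
def maxShippingDist_alt (list1 : List (List Int)) (list2 : List (List Int)) (maxDist : Int) : List (List Int) :=
  if list1 = [] ∨ list1.headD [] = [] ∨ list2 = [] ∨ list2.headD [] = [] then []
  else
    let vals2 : List Int :=
      PySem.List.sorted ((list2.filter (fun it => it.length = 2)).map (fun it => it.getD 1 0)) (fun v => v) false
    let idsByVal : PySem.Dict Int (List Int) :=
      list2.foldl (fun d it =>
        if it.length = 2 then d.modify (it.getD 1 0) [] (fun xs => xs ++ [it.getD 0 0]) else d) ⟨[]⟩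
    let best : Int := list1.foldl (fun best it =>
      if it.length = 2 then
        let i := PySem.List.bisectRight vals2 (maxDist - it.getD 1 0)
        if 0 < i then
          let s := it.getD 1 0 + vals2.getD (i - 1) 0
          if best < s then s else best
        else best
      else best) 0
    list1.foldl (fun out it =>
      if it.length = 2 then
        (idsByVal.getD (best - it.getD 1 0) []).foldl (fun out j => out ++ [[it.getD 0 0, j]]) out
      else out) []

-- ===== PRECONDITION & SPEC =====
def Spec_maxShippingDist (list1 : List (List Int)) (list2 : List (List Int)) (maxDist : Int) (out : List (List Int)) : Prop := out = maxShippingDist_alt list1 list2 maxDist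
instance (list1 : List (List Int)) (list2 : List (List Int)) (maxDist : Int) (out : List (List Int)) : Decidable (Spec_maxShippingDist list1 list2 maxDist out) := by unfold Spec_maxShippingDist; infer_instance

-- ===== CLAIM (what is proved, stated in full; the proofs are below) =====
def Claim_equal_maxShippingDist : Prop := ∀ (list1 : List (List Int)) (list2 : List (List Int)) (maxDist : Int), Dom_maxShippingDist list1 list2 maxDist → Spec_maxShippingDist list1 list2 maxDist (maxShippingDist list1 list2 maxDist)

-- ===== LEMMAS AND PROOFS =====

-- a fold whose step never changes the accumulator is the accumulator
lemma pv_foldl_fixed {α β : Type} (f : β → α → β) (l : List α) (a : β)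
    (h : ∀ b x, f b x = b) : l.foldl f a = a := by
  induction l generalizing a with
  | nil => rfl
  | cons x t ih => simp [List.foldl_cons, h, ih]

-- two folds with steps that agree on the list's elements are equal
lemma pv_foldl_congr {α β : Type} (f g : β → α → β) : ∀ (l : List α) (a : β),
    (∀ b x, x ∈ l → f b x = g b x) → l.foldl f a = l.foldl g a := by
  intro l
  induction l with
  | nil => intro a _; rfl
  | cons x t ih =>
    intro a h
    rw [List.foldl_cons, List.foldl_cons, h a x (by simp)]
    exact ih _ (fun b y hy => h b y (by simp [hy]))

-- fold of 'max acc (v1 + v)' over a nonempty ≤-sorted list is max acc (v1 + last)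
lemma pv_foldl_max_sorted (v1 : Int) : ∀ (l : List Int) (od : Int)
    (_ : l.Pairwise (· ≤ ·)) (h : l ≠ []),
    l.foldl (fun a v => max a (v1 + v)) od = max od (v1 + l.getLast h) := by
  intro l
  induction l with
  | nil => intro od _ h; exact absurd rfl h
  | cons x t ih =>
    intro od hs h
    cases t with
    | nil => simp
    | cons y u =>
      rw [List.pairwise_cons] at hs
      obtain ⟨hx0, hs'⟩ := hs
      have hxl : x ≤ (y :: u).getLast (List.cons_ne_nil _ _) := hx0 _ (List.getLast_mem _)
      rw [List.foldl_cons, ih _ hs' (by simp), max_assoc,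
        max_eq_right (by omega : v1 + x ≤ v1 + (y :: u).getLast (List.cons_ne_nil _ _)),
        show (x :: y :: u).getLast h = (y :: u).getLast (List.cons_ne_nil _ _) from List.getLast_cons _]

-- on a list whose '≤ c' region is exactly the prefix of length i, filter = take i
lemma pv_filter_eq_take (c : Int) : ∀ (l : List Int) (i : Nat), i ≤ l.length →
    (∀ j (hj : j < l.length), j < i → l[j] ≤ c) →
    (∀ j (hj : j < l.length), i ≤ j → c < l[j]) →
    l.filter (fun v => v ≤ c) = l.take i := by
  intro l
  induction l with
  | nil => intro i _ _ _; simp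
  | cons x t ih =>
    intro i hi h1 h2
    cases i with
    | zero =>
      simp only [List.take_zero]
      rw [List.filter_eq_nil_iff]
      intro a ha
      rcases List.mem_iff_getElem.1 ha with ⟨j, hj, rfl⟩
      have := h2 j hj (Nat.zero_le _)
      simp
      omega
    | succ k =>
      have hx : x ≤ c := h1 0 (by simp) (by omega)
      have ht : t.filter (fun v => v ≤ c) = t.take k := by
        apply ih k (by simpa using hi)
        · intro j hj hjk
          have := h1 (j+1) (by simpa using Nat.succ_lt_succ hj) (by omega)
          simpa using this
        · intro j hj hkj
          have := h2 (j+1) (by simpa using Nat.succ_lt_succ hj) (by omega)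
          simpa using this
      simp [hx, ht, List.take_succ_cons]

-- the grouping fold: the entry of key k collects the first components of the
-- len-2 items of l2 whose second component is k, in order
lemma pv_dict_group (k : Int) : ∀ (l2 : List (List Int)) (d : PySem.Dict Int (List Int)),
    (l2.foldl (fun d it =>
        if it.length = 2 then d.modify (it.getD 1 0) [] (fun xs => xs ++ [it.getD 0 0]) else d) d).getD k []
    = d.getD k [] ++ (l2.filter (fun it => it.length = 2 && it.getD 1 0 == k)).map (fun it => it.getD 0 0) := by
  intro l2
  induction l2 with
  | nil => intro d; simp
  | cons it t ih =>
    intro d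
    by_cases hlen : it.length = 2
    · by_cases hk : it.getD 1 0 = k
      · simp only [List.foldl_cons, if_pos hlen]
        rw [ih, PySem.Dict.modify, PySem.Dict.getD_insert, if_pos hk.symm,
          List.filter_cons, if_pos (by rw [hk]; simp [hlen])]
        rw [hk]
        simp
      · simp only [List.foldl_cons, if_pos hlen]
        rw [ih, PySem.Dict.modify, PySem.Dict.getD_insert, if_neg (fun h => hk h.symm),
          List.filter_cons,
          if_neg (by simp only [Bool.and_eq_true, decide_eq_true_eq, beq_iff_eq, not_and]; exact fun _ => hk)]
    · simp only [List.foldl_cons, if_neg hlen]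
      rw [ih, List.filter_cons, if_neg (by simp [hlen])]

-- per-item1 step of the best-distance pass: A's inner scan over list2 equals B's binary search
lemma pv_best_step (list2 : List (List Int)) (maxDist : Int) (it1 : List Int) (od : Int) :
    list2.foldl (fun od item2 =>
        if it1.length = 2 ∧ item2.length = 2 then
          if it1.getD 1 0 + item2.getD 1 0 ≤ maxDist then
            max od (it1.getD 1 0 + item2.getD 1 0)
          else od
        else od) od
    = (if it1.length = 2 then
        let vals2 := PySem.List.sorted ((list2.filter (fun it => it.length = 2)).map (fun it => it.getD 1 0)) (fun v => v) false
        let i := PySem.List.bisectRight vals2 (maxDist - it1.getD 1 0)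
        if 0 < i then
          let s := it1.getD 1 0 + vals2.getD (i - 1) 0
          if od < s then s else od
        else od
      else od) := by
  by_cases h1 : it1.length = 2
  · simp only [h1, if_true, true_and]
    set v1 := it1.getD 1 0 with hv1
    set vals := (list2.filter (fun it => it.length = 2)).map (fun it => it.getD 1 0) with hvals
    set vals2 := PySem.List.sorted vals (fun v => v) false with hvals2
    have hperm : vals2.Perm vals := PySem.List.sorted_perm _ _ _
    have hsorted : vals2.Pairwise (· ≤ ·) := PySem.List.sorted_pairwise vals (fun v => v)
    -- collapse A's inner scan to a fold over vals
    have hcollapse :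
        list2.foldl (fun od item2 =>
          if item2.length = 2 then
            (if v1 + item2.getD 1 0 ≤ maxDist then max od (v1 + item2.getD 1 0) else od)
          else od) od
        = vals.foldl (fun a v => if v1 + v ≤ maxDist then max a (v1 + v) else a) od := by
      rw [hvals, List.foldl_map, List.foldl_filter]
      apply pv_foldl_congr
      intro a x _
      by_cases hx : x.length = 2 <;> simp [hx]
    -- replace vals by its sorted permutation (the step is right-commutative)
    have hperm' :
        vals.foldl (fun a v => if v1 + v ≤ maxDist then max a (v1 + v) else a) od
        = vals2.foldl (fun a v => if v1 + v ≤ maxDist then max a (v1 + v) else a) od := by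
      refine (List.Perm.foldl_eq (rcomm := ⟨?_⟩) hperm.symm od)
      intro a b c
      dsimp only
      split_ifs <;> first | rfl | exact max_right_comm a _ _
    set c := maxDist - v1 with hc
    set i := PySem.List.bisectRight vals2 c with hi
    obtain ⟨hile, hlt, hgt⟩ := PySem.List.bisectRight_spec vals2 c hsorted
    have hfilter : vals2.filter (fun v => v ≤ c) = vals2.take i :=
      pv_filter_eq_take c vals2 i hile (fun j hj hji => hlt j hj (by rwa [← hi]))
        (fun j hj hij => hgt j hj (by rwa [← hi]))
    have hguard :
        vals2.foldl (fun a v => if v1 + v ≤ maxDist then max a (v1 + v) else a) od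
        = (vals2.filter (fun v => v ≤ c)).foldl (fun a v => max a (v1 + v)) od := by
      rw [List.foldl_filter]
      apply pv_foldl_congr
      intro a x _
      have : (v1 + x ≤ maxDist) ↔ (x ≤ c) := by omega
      by_cases hx : x ≤ c <;> simp [hx, this]
    rw [hcollapse, hperm', hguard, hfilter]
    by_cases hi0 : 0 < i
    · have hlen : (vals2.take i).length = i := by rw [List.length_take]; omega
      have hne : vals2.take i ≠ [] := by
        intro h; rw [h] at hlen; simp at hlen; omega
      have hilen : i - 1 < vals2.length := by omega
      have hlast : (vals2.take i).getLast hne = vals2.getD (i-1) 0 := by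
        rw [List.getLast_eq_getElem, List.getElem_take, List.getD_eq_getElem _ _ hilen]
        congr 1
        rw [hlen]
      have hsorted' : (vals2.take i).Pairwise (· ≤ ·) := hsorted.sublist (List.take_sublist _ _)
      rw [pv_foldl_max_sorted v1 _ od hsorted' hne, hlast, if_pos hi0]
      rcases lt_or_ge od (v1 + vals2.getD (i-1) 0) with h | h
      · rw [if_pos h, max_eq_right (le_of_lt h)]
      · rw [if_neg (not_lt.2 h), max_eq_left h]
    · have : i = 0 := by omega
      simp [this]
  · simp only [h1, if_false, false_and]
    exact pv_foldl_fixed _ _ _ (fun b x => by simp)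

-- per-item1 step of the collection pass: A's inner scan over list2 equals B's index lookup
lemma pv_collect_step (list2 : List (List Int)) (best : Int) (it1 : List Int) (ret : List (List Int)) :
    list2.foldl (fun ret item2 =>
        if it1.length = 2 ∧ item2.length = 2 then
          if it1.getD 1 0 + item2.getD 1 0 = best then
            ret ++ [[it1.getD 0 0, item2.getD 0 0]]
          else ret
        else ret) ret
    = (if it1.length = 2 then
        ((list2.foldl (fun d it =>
            if it.length = 2 then d.modify (it.getD 1 0) [] (fun xs => xs ++ [it.getD 0 0]) else d)
            (⟨[]⟩ : PySem.Dict Int (List Int))).getD (best - it1.getD 1 0) []).foldl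
          (fun out j => out ++ [[it1.getD 0 0, j]]) ret
      else ret) := by
  by_cases h1 : it1.length = 2
  · simp only [h1, if_true, true_and]
    rw [PySem.List.foldl_append_singleton_eq_map, pv_dict_group]
    have hA : list2.foldl (fun ret item2 =>
          if item2.length = 2 then
            (if it1.getD 1 0 + item2.getD 1 0 = best then ret ++ [[it1.getD 0 0, item2.getD 0 0]] else ret)
          else ret) ret
        = ret ++ (list2.filter (fun it => it.length = 2 && it.getD 1 0 == best - it1.getD 1 0)).map
            (fun it => [it1.getD 0 0, it.getD 0 0]) := by
      rw [← PySem.List.foldl_append_if (fun it => it.length = 2 && it.getD 1 0 == best - it1.getD 1 0)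
            (fun it => [it1.getD 0 0, it.getD 0 0]) list2 ret]
      apply pv_foldl_congr
      intro b x _
      by_cases hx : x.length = 2
      · rw [if_pos hx]
        by_cases hk : x.getD 1 0 = best - it1.getD 1 0
        · rw [if_pos (show it1.getD 1 0 + x.getD 1 0 = best by omega),
            if_pos (show (decide (x.length = 2) && (x.getD 1 0 == best - it1.getD 1 0)) = true by rw [hk]; simp [hx])]
        · rw [if_neg (show ¬ it1.getD 1 0 + x.getD 1 0 = best from fun hh => hk (by omega)),
            if_neg (by simp only [Bool.and_eq_true, decide_eq_true_eq, beq_iff_eq, not_and]; exact fun _ => hk)]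
      · rw [if_neg hx, if_neg (by simp [hx])]
    rw [hA]
    simp [PySem.Dict.getD, PySem.Dict.get?, List.map_map]
  · simp only [h1, if_false, false_and]
    exact pv_foldl_fixed _ _ _ (fun b x => by simp)

-- ===== VERDICT (by name: the statement is the Claim_ definition above) =====
theorem maxShippingDist_spec : Claim_equal_maxShippingDist := by
  intro list1 list2 maxDist _
  unfold Spec_maxShippingDist maxShippingDist maxShippingDist_alt
  by_cases hg : list1 = [] ∨ list1.headD [] = [] ∨ list2 = [] ∨ list2.headD [] = []
  · rw [if_pos hg, if_pos hg]
  · rw [if_neg hg, if_neg hg]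
    have hbest : list1.foldl (fun od item1 =>
        list2.foldl (fun od item2 =>
          if item1.length = 2 ∧ item2.length = 2 then
            if item1.getD 1 0 + item2.getD 1 0 ≤ maxDist then
              max od (item1.getD 1 0 + item2.getD 1 0)
            else od
          else od) od) 0
      = list1.foldl (fun best it =>
          if it.length = 2 then
            let i := PySem.List.bisectRight (PySem.List.sorted ((list2.filter (fun it => it.length = 2)).map (fun it => it.getD 1 0)) (fun v => v) false) (maxDist - it.getD 1 0)
            if 0 < i then
              let s := it.getD 1 0 + (PySem.List.sorted ((list2.filter (fun it => it.length = 2)).map (fun it => it.getD 1 0)) (fun v => v) false).getD (i - 1) 0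
              if best < s then s else best
            else best
          else best) 0 := by
      apply pv_foldl_congr
      intro a x _
      exact pv_best_step list2 maxDist x a
    rw [hbest]
    apply pv_foldl_congr
    intro a x _
    exact pv_collect_step list2 _ x a
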